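-- pv_equiv track=rewrite | github.com/WangZhehao37/my-DS-repository | cs101/25353.py | min_lexicographical_order
-- ===== SOURCE A (Python) =====
-- def min_lexicographical_order(N, D, heights):
--     # 初始化分组
--     groups = []
--     current_group = []
--
--     for i in range(N):
--         if current_group and heights[i] - current_group[-1] <= D:
--             current_group.append(heights[i])
--         else:
--             if current_group:
--                 groups.append(current_group)
--             current_group = [heights[i]]
--
--     # 添加最后一组
--     if current_group:
--         groups.append(current_group)
--
--     # 对每个组内的身高进行排序
--     sorted_groups = [sorted(group) for group in groups]
--
--     # 合并所有组内的排序结果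
--     result = []
--     for group in sorted_groups:
--         result.extend(group)
--
--     return result
-- ===== SOURCE B (Python) =====
-- def min_lexicographical_order(N, D, heights):
--     # Decorate-sort-undecorate: tag each element with a running group id,
--     # sort all (gid, height) pairs once globally, then drop the tags.
--     keyed = []
--     gid = 0
--     for i in range(N):
--         if i and heights[i] - heights[i - 1] > D:
--             gid += 1
--         keyed.append((gid, heights[i]))
--     keyed.sort()
--     return [h for _, h in keyed]
-- ===== Notes on version B (the rewrite author's own statement) =====
-- stated objective: alternative
-- what changed: B replaces A's group-building (grow current_group, flush into a list of groups, sort each group, concatenate) by decorate-sort-undecorate: one pass tags every element with a running group id, then a SINGLE global sort of (gid, height) pairs replaces all the per-group sorts, and the tags are projected away.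
import Mathlib
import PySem

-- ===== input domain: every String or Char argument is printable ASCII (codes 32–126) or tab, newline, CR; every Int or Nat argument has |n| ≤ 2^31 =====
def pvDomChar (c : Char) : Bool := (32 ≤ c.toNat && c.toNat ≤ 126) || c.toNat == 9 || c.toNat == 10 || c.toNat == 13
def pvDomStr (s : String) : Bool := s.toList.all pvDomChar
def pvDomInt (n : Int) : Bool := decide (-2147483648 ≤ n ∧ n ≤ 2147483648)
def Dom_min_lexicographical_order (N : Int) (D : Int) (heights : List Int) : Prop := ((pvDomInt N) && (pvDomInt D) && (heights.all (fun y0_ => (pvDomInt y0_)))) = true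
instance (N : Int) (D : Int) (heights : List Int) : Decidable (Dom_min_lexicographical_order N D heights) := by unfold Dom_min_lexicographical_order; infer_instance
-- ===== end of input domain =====

-- B is a decorate-sort-undecorate alternative: it tags each element with a running group id and
-- performs ONE global sort of (gid, height) pairs instead of building groups and sorting each.

-- ===== PORT A =====
def min_lexicographical_order (N : Int) (D : Int) (heights : List Int) : List Int :=
  let st := (PySem.List.pyRange 0 N 1).foldl
    (fun (st : List (List Int) × List Int) i =>
      let h := PySem.List.pyGetD heights i 0
      if st.2 ≠ [] ∧ h - PySem.List.pyGetD st.2 (-1) 0 ≤ D then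
        (st.1, st.2 ++ [h])
      else
        ((if st.2 ≠ [] then st.1 ++ [st.2] else st.1), [h])) ([], [])
  let groups := if st.2 ≠ [] then st.1 ++ [st.2] else st.1
  let sortedGroups := groups.map (fun g => PySem.List.sorted g (fun x => x) false)
  sortedGroups.foldl (fun acc g => acc ++ g) []

-- ===== PORT B =====
def min_lexicographical_order_alt (N : Int) (D : Int) (heights : List Int) : List Int :=
  let st := (PySem.List.pyRange 0 N 1).foldl
    (fun (st : List (Int × Int) × Int) i =>
      let g := if i ≠ 0 ∧ D < PySem.List.pyGetD heights i 0 - PySem.List.pyGetD heights (i - 1) 0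
               then st.2 + 1 else st.2
      (st.1 ++ [(g, PySem.List.pyGetD heights i 0)], g)) ([], 0)
  -- keyed.sort() on tuples: Python's lexicographic tuple order = sorted2 with the two components
  (PySem.List.sorted2 st.1 (fun p => p.1) (fun p => p.2) false).map (fun p => p.2)

-- ===== PRECONDITION & SPEC =====
-- Pre_ excludes only N > len(heights), on which A raises IndexError at heights[i].
def Pre_min_lexicographical_order (N : Int) (D : Int) (heights : List Int) : Prop :=
  N ≤ (heights.length : Int)
instance (N : Int) (D : Int) (heights : List Int) : Decidable (Pre_min_lexicographical_order N D heights) := by unfold Pre_min_lexicographical_order; infer_instance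

def pvWitness_min_lexicographical_order : Int × Int × List Int := (3, 1, [5, 1, 2])

def Spec_min_lexicographical_order (N : Int) (D : Int) (heights : List Int) (out : List Int) : Prop := out = min_lexicographical_order_alt N D heights
instance (N : Int) (D : Int) (heights : List Int) (out : List Int) : Decidable (Spec_min_lexicographical_order N D heights out) := by unfold Spec_min_lexicographical_order; infer_instance

-- ===== CLAIM (what is proved, stated in full; the proofs are below) =====
def Claim_equal_min_lexicographical_order : Prop := ∀ (N : Int) (D : Int) (heights : List Int), Dom_min_lexicographical_order N D heights → Pre_min_lexicographical_order N D heights → Spec_min_lexicographical_order N D heights (min_lexicographical_order N D heights)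

-- ===== LEMMAS AND PROOFS =====

-- A's loop body, on the element itself.
def stepA (D : Int) (st : List (List Int) × List Int) (h : Int) : List (List Int) × List Int :=
  if st.2 ≠ [] ∧ h - PySem.List.pyGetD st.2 (-1) 0 ≤ D then
    (st.1, st.2 ++ [h])
  else
    ((if st.2 ≠ [] then st.1 ++ [st.2] else st.1), [h])

-- B's loop body, on the index.
def stepB (D : Int) (heights : List Int) (st : List (Int × Int) × Int) (i : Int) : List (Int × Int) × Int :=
  let g := if i ≠ 0 ∧ D < PySem.List.pyGetD heights i 0 - PySem.List.pyGetD heights (i - 1) 0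
           then st.2 + 1 else st.2
  (st.1 ++ [(g, PySem.List.pyGetD heights i 0)], g)

-- The cut table up to bound m (without the closing bound).
def cutsI (D : Int) (heights : List Int) (m : Int) : List Int :=
  0 :: (PySem.List.pyRange 1 m 1).filter
      (fun i => decide (D < PySem.List.pyGetD heights i 0 - PySem.List.pyGetD heights (i - 1) 0))

-- Groups read off a cut list by slicing.
def gmap (heights : List Int) (cs : List Int) : List (List Int) :=
  (cs.zip cs.tail).map (fun ab => PySem.List.slice heights (some ab.1) (some ab.2))

-- Blocks tagged with consecutive group ids starting at k, flattened.
def kflat (k : Int) : List (List Int) → List (Int × Int)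
  | [] => []
  | g :: gs => g.map (fun h => (k, h)) ++ kflat (k + 1) gs

lemma cutsI_ne_nil (D : Int) (heights : List Int) (m : Int) : cutsI D heights m ≠ [] := by
  simp [cutsI]

lemma cutsI_mem (D : Int) (heights : List Int) (m : Int) (x : Int)
    (hx : x ∈ cutsI D heights m) : 0 ≤ x ∧ (x = 0 ∨ x < m) := by
  simp only [cutsI, List.mem_cons, List.mem_filter] at hx
  rcases hx with rfl | ⟨hmem, _⟩
  · exact ⟨le_refl 0, Or.inl rfl⟩
  · rw [PySem.List.mem_pyRange_one] at hmem
    exact ⟨by omega, Or.inr hmem.2⟩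

lemma gmap_snoc (heights : List Int) (cs : List Int) (h : cs ≠ []) (e : Int) :
    gmap heights (cs ++ [e]) =
      gmap heights cs ++ [PySem.List.slice heights (some (cs.getLast h)) (some e)] := by
  induction cs with
  | nil => exact absurd rfl h
  | cons c cs ih =>
    cases cs with
    | nil => simp [gmap]
    | cons c2 cs2 =>
      have h2 : (c2 :: cs2) ≠ [] := by simp
      have := ih h2
      simp only [gmap, List.cons_append, List.tail_cons, List.zip_cons_cons, List.map_cons] at this ⊢
      rw [this]
      simp [List.getLast_cons h2]

lemma length_gmap (heights : List Int) (cs : List Int) :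
    (gmap heights cs).length = cs.length - 1 := by
  cases cs with
  | nil => simp [gmap]
  | cons a t => simp [gmap, List.length_zip]

lemma kflat_append (k : Int) (bs cs : List (List Int)) :
    kflat k (bs ++ cs) = kflat k bs ++ kflat (k + (bs.length : Int)) cs := by
  induction bs generalizing k with
  | nil => simp [kflat]
  | cons b bs ih =>
    simp only [List.cons_append, kflat, ih (k + 1), List.length_cons, List.append_assoc]
    congr 3
    push_cast
    ring

lemma kflat_singleton (k : Int) (g : List Int) :
    kflat k [g] = g.map (fun h => (k, h)) := by
  simp [kflat]

lemma mem_kflat_fst (k : Int) (bs : List (List Int)) (p : Int × Int)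
    (hp : p ∈ kflat k bs) : k ≤ p.1 := by
  induction bs generalizing k with
  | nil => simp [kflat] at hp
  | cons b bs ih =>
    simp only [kflat, List.mem_append, List.mem_map] at hp
    rcases hp with ⟨h, _, rfl⟩ | hp
    · exact le_refl k
    · have := ih (k + 1) hp
      omega

lemma A_fold_take (D : Int) (heights : List Int) (n : Nat) (hn : n ≤ heights.length) :
    (PySem.List.pyRange 0 (n : Int) 1).foldl
        (fun st i => stepA D st (PySem.List.pyGetD heights i 0)) ([], [])
      = (heights.take n).foldl (stepA D) ([], []) := by
  have hl : (heights.take n).length = n := by simp; omega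
  have hcongr :
      (PySem.List.pyRange 0 (n : Int) 1).foldl
          (fun st i => stepA D st (PySem.List.pyGetD heights i 0)) ([], [])
        = (PySem.List.pyRange 0 (n : Int) 1).foldl
          (fun st i => stepA D st (PySem.List.pyGetD (heights.take n) i 0)) ([], []) := by
    apply PySem.List.foldl_congr_mem
    intro st i hi
    rw [PySem.List.mem_pyRange_one] at hi
    have hin : i < (heights.length : Int) := by omega
    have hit : i < ((heights.take n).length : Int) := by rw [hl]; exact hi.2
    rw [PySem.List.pyGetD_eq_getElem heights 0 hi.1 hin,
        PySem.List.pyGetD_eq_getElem (heights.take n) 0 hi.1 hit]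
    congr 1
    rw [List.getElem_take]
  rw [hcongr, show ((n : Nat) : Int) = ((heights.take n).length : Int) by rw [hl]]
  exact PySem.List.foldl_pyRange_zero_pyGetD' (heights.take n) 0 (stepA D) ([], [])

lemma loopA_inv (D : Int) (heights : List Int) (n : Nat) (h1 : 1 ≤ n) (hn : n ≤ heights.length) :
    (heights.take n).foldl (stepA D) ([], []) =
      (gmap heights (cutsI D heights (n : Int)),
       PySem.List.slice heights
         (some ((cutsI D heights (n : Int)).getLast (cutsI_ne_nil D heights (n : Int))))
         (some (n : Int))) := by
  induction n with
  | zero => omega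
  | succ m ih =>
    rcases Nat.eq_zero_or_pos m with rfl | hm
    · -- n = 1
      have h0 : 0 < heights.length := by omega
      have hcuts : cutsI D heights 1 = [0] := by
        simp [cutsI, PySem.List.pyRange_one_eq_nil (le_refl (1 : Int))]
      have htake : heights.take 1 = [heights[0]] := by
        cases heights with
        | nil => simp at h0
        | cons a t => simp
      have hslice : PySem.List.slice heights (some 0) (some (1 : Int)) = [heights[0]] := by
        rw [PySem.List.slice_toNat heights (by norm_num) (by norm_num)]
        simpa using htake
      rw [htake]
      simp only [List.foldl_cons, List.foldl_nil, stepA]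
      simp [hcuts, gmap, hslice]
    · -- m ≥ 1, n = m + 1
      have hmn : m ≤ heights.length := by omega
      have hmlt : m < heights.length := by omega
      have ihm := ih hm hmn
      have htake : heights.take (m + 1) = heights.take m ++ [heights[m]] := by
        rw [List.take_succ, List.getElem?_eq_getElem hmlt]
        rfl
      rw [htake, List.foldl_append, ihm]
      simp only [List.foldl_cons, List.foldl_nil]
      set c : Int := (cutsI D heights (m : Int)).getLast (cutsI_ne_nil D heights (m : Int)) with hcdef
      have hcmem := cutsI_mem D heights (m : Int) c (List.getLast_mem _)
      have hc0 : 0 ≤ c := hcmem.1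
      have hclt : c < (m : Int) := by
        rcases hcmem.2 with h | h
        · rw [h]; exact_mod_cast hm
        · exact h
      set c' : Nat := c.toNat with hc'def
      have hcc : (c' : Int) = c := Int.toNat_of_nonneg hc0
      have hc'm : c' < m := by omega
      have hcur : PySem.List.slice heights (some c) (some (m : Int))
          = (heights.drop c').take (m - c') := by
        rw [PySem.List.slice_toNat heights hc0 (by positivity)]
        simp [hc'def]
      have hlcur : ((heights.drop c').take (m - c')).length = m - c' := by
        simp [List.length_take, List.length_drop]; omega
      have hne : (heights.drop c').take (m - c') ≠ [] := by
        intro hh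
        rw [hh] at hlcur
        simp at hlcur
        omega
      have hm1lt : m - 1 < heights.length := by omega
      have hlast : PySem.List.pyGetD ((heights.drop c').take (m - c')) (-1) 0
          = heights[m - 1] := by
        rw [PySem.List.pyGetD_neg_one _ 0 hne, List.getLast_eq_getElem]
        rw [List.getElem_take, List.getElem_drop]
        congr 1
        rw [hlcur]; omega
      have hgm : PySem.List.pyGetD heights ((m : Nat) : Int) 0 = heights[m] :=
        PySem.List.pyGetD_eq_getElem heights 0 (by positivity) (by exact_mod_cast hmlt)
      have hgm1 : PySem.List.pyGetD heights (((m : Nat) : Int) - 1) 0 = heights[m - 1] := by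
        have he : ((m : Nat) : Int) - 1 = ((m - 1 : Nat) : Int) := by omega
        rw [he, PySem.List.pyGetD_eq_getElem heights 0 (by positivity) (by exact_mod_cast hm1lt)]
        simp
      have hcuts : cutsI D heights ((m + 1 : Nat) : Int)
          = cutsI D heights (m : Int)
            ++ (if D < heights[m] - heights[m - 1] then [(m : Int)] else []) := by
        unfold cutsI
        rw [show (((m + 1 : Nat)) : Int) = ((m : Nat) : Int) + 1 by push_cast; ring]
        rw [PySem.List.pyRange_one_succ_right (by exact_mod_cast hm), List.filter_append]
        rw [List.filter_singleton]
        simp [hgm, hgm1]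
      rw [stepA, hcur, hlast]
      by_cases hb : D < heights[m] - heights[m - 1]
      · -- boundary: a new group starts at index m
        rw [if_neg (fun hcontra => absurd hcontra.2 (by omega))]
        have hcuts' : cutsI D heights ((m + 1 : Nat) : Int)
            = cutsI D heights (m : Int) ++ [(m : Int)] := by
          rw [hcuts, if_pos hb]
        have hgl : (cutsI D heights ((m + 1 : Nat) : Int)).getLast
            (cutsI_ne_nil D heights ((m + 1 : Nat) : Int)) = (m : Int) := by
          rw [List.getLast_eq_iff_getLast?_eq_some, hcuts', List.getLast?_concat]
        have hsl : PySem.List.slice heights (some (m : Int)) (some ((m + 1 : Nat) : Int))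
            = [heights[m]] := by
          rw [PySem.List.slice_toNat heights (by positivity) (by positivity),
              show ((m + 1 : Nat) : Int).toNat = m + 1 by omega,
              show ((m : Nat) : Int).toNat = m by omega,
              show m + 1 - m = 1 by omega,
              List.drop_eq_getElem_cons hmlt]
          rfl
        rw [hgl, hcuts', hsl,
            gmap_snoc heights _ (cutsI_ne_nil D heights (m : Int)) (m : Int), ← hcdef, hcur]
        rw [if_pos hne]
      · -- no boundary: the current group is extended
        rw [if_pos ⟨hne, by omega⟩]
        have hcuts' : cutsI D heights ((m + 1 : Nat) : Int) = cutsI D heights (m : Int) := by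
          rw [hcuts, if_neg hb, List.append_nil]
        have hgl : (cutsI D heights ((m + 1 : Nat) : Int)).getLast
            (cutsI_ne_nil D heights ((m + 1 : Nat) : Int)) = c := by
          rw [List.getLast_eq_iff_getLast?_eq_some, hcuts', hcdef,
              List.getLast?_eq_some_getLast (cutsI_ne_nil D heights (m : Int))]
        have hsl : PySem.List.slice heights (some c) (some ((m + 1 : Nat) : Int))
            = List.take (m - c') (List.drop c' heights) ++ [heights[m]] := by
          rw [PySem.List.slice_toNat heights hc0 (by positivity)]
          have harith : ((m + 1 : Nat) : Int).toNat - c.toNat = (m - c') + 1 := by omega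
          rw [harith, List.take_succ, List.getElem?_drop]
          rw [List.getElem?_eq_getElem (by omega : c.toNat + (m - c.toNat) < heights.length)]
          simp only [show c.toNat + (m - c.toNat) = m by omega]
          rfl
        rw [hgl, hcuts', hsl]

-- B's loop invariant: the keyed list is the tagged flattening of the groups so far,
-- and gid is the number of cuts minus one.
lemma loopB_inv (D : Int) (heights : List Int) (n : Nat) (h1 : 1 ≤ n) (hn : n ≤ heights.length) :
    (PySem.List.pyRange 0 (n : Int) 1).foldl (stepB D heights) ([], 0) =
      (kflat 0 (gmap heights (cutsI D heights (n : Int)) ++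
         [PySem.List.slice heights
           (some ((cutsI D heights (n : Int)).getLast (cutsI_ne_nil D heights (n : Int))))
           (some (n : Int))]),
       ((cutsI D heights (n : Int)).length : Int) - 1) := by
  induction n with
  | zero => omega
  | succ m ih =>
    rcases Nat.eq_zero_or_pos m with rfl | hm
    · -- n = 1
      have h0 : 0 < heights.length := by omega
      have hcuts : cutsI D heights 1 = [0] := by
        simp [cutsI, PySem.List.pyRange_one_eq_nil (le_refl (1 : Int))]
      have hslice : PySem.List.slice heights (some 0) (some (1 : Int)) = [heights[0]] := by
        rw [PySem.List.slice_toNat heights (by norm_num) (by norm_num)]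
        cases heights with
        | nil => simp at h0
        | cons a t => simp
      have hr : PySem.List.pyRange 0 ((1 : Nat) : Int) 1 = [0] := by
        norm_num [PySem.List.pyRange_one_cons, PySem.List.pyRange_one_eq_nil]
      have hg0 : PySem.List.pyGetD heights 0 0 = heights[0] := by
        rw [PySem.List.pyGetD_eq_getElem heights 0 le_rfl (by exact_mod_cast h0)]
        simp
      rw [hr]
      simp only [List.foldl_cons, List.foldl_nil, stepB]
      norm_num [hcuts, gmap, hslice, kflat, hg0]
    · -- m ≥ 1, n = m + 1
      have hmn : m ≤ heights.length := by omega
      have hmlt : m < heights.length := by omega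
      have ihm := ih hm hmn
      have hr : PySem.List.pyRange 0 ((m + 1 : Nat) : Int) 1
          = PySem.List.pyRange 0 ((m : Nat) : Int) 1 ++ [((m : Nat) : Int)] := by
        rw [show (((m + 1 : Nat)) : Int) = ((m : Nat) : Int) + 1 by push_cast; ring]
        exact PySem.List.pyRange_one_succ_right (by positivity)
      rw [hr, List.foldl_append, ihm]
      simp only [List.foldl_cons, List.foldl_nil]
      set c : Int := (cutsI D heights (m : Int)).getLast (cutsI_ne_nil D heights (m : Int)) with hcdef
      have hcmem := cutsI_mem D heights (m : Int) c (List.getLast_mem _)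
      have hc0 : 0 ≤ c := hcmem.1
      have hclt : c < (m : Int) := by
        rcases hcmem.2 with h | h
        · rw [h]; exact_mod_cast hm
        · exact h
      set c' : Nat := c.toNat with hc'def
      have hc'm : c' < m := by omega
      have hcur : PySem.List.slice heights (some c) (some (m : Int))
          = (heights.drop c').take (m - c') := by
        rw [PySem.List.slice_toNat heights hc0 (by positivity)]
        simp [hc'def]
      have hm1lt : m - 1 < heights.length := by omega
      have hgm : PySem.List.pyGetD heights ((m : Nat) : Int) 0 = heights[m] :=
        PySem.List.pyGetD_eq_getElem heights 0 (by positivity) (by exact_mod_cast hmlt)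
      have hgm1 : PySem.List.pyGetD heights (((m : Nat) : Int) - 1) 0 = heights[m - 1] := by
        have he : ((m : Nat) : Int) - 1 = ((m - 1 : Nat) : Int) := by omega
        rw [he, PySem.List.pyGetD_eq_getElem heights 0 (by positivity) (by exact_mod_cast hm1lt)]
        simp
      have hcuts : cutsI D heights ((m + 1 : Nat) : Int)
          = cutsI D heights (m : Int)
            ++ (if D < heights[m] - heights[m - 1] then [(m : Int)] else []) := by
        unfold cutsI
        rw [show (((m + 1 : Nat)) : Int) = ((m : Nat) : Int) + 1 by push_cast; ring]
        rw [PySem.List.pyRange_one_succ_right (by exact_mod_cast hm), List.filter_append]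
        rw [List.filter_singleton]
        simp [hgm, hgm1]
      have hlen1 : 1 ≤ (cutsI D heights (m : Int)).length :=
        List.length_pos_of_ne_nil (cutsI_ne_nil D heights (m : Int))
      have hlgm : (gmap heights (cutsI D heights (m : Int))).length
          = (cutsI D heights (m : Int)).length - 1 := length_gmap heights _
      rw [stepB, hgm, hgm1]
      by_cases hb : D < heights[m] - heights[m - 1]
      · -- boundary: new group id
        rw [if_pos ⟨by positivity, hb⟩]
        have hcuts' : cutsI D heights ((m + 1 : Nat) : Int)
            = cutsI D heights (m : Int) ++ [(m : Int)] := by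
          rw [hcuts, if_pos hb]
        have hgl : (cutsI D heights ((m + 1 : Nat) : Int)).getLast
            (cutsI_ne_nil D heights ((m + 1 : Nat) : Int)) = (m : Int) := by
          rw [List.getLast_eq_iff_getLast?_eq_some, hcuts', List.getLast?_concat]
        have hsl : PySem.List.slice heights (some (m : Int)) (some ((m + 1 : Nat) : Int))
            = [heights[m]] := by
          rw [PySem.List.slice_toNat heights (by positivity) (by positivity),
              show ((m + 1 : Nat) : Int).toNat = m + 1 by omega,
              show ((m : Nat) : Int).toNat = m by omega,
              show m + 1 - m = 1 by omega,
              List.drop_eq_getElem_cons hmlt]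
          rfl
        have hXlen : ((gmap heights (cutsI D heights (m : Int))
              ++ [List.take (m - c') (List.drop c' heights)]).length : Int)
            = ((cutsI D heights (m : Int)).length : Int) := by
          simp only [List.length_append, List.length_cons, List.length_nil, hlgm]
          omega
        have hR : kflat 0 ((gmap heights (cutsI D heights (m : Int))
              ++ [List.take (m - c') (List.drop c' heights)]) ++ [[heights[m]]])
            = kflat 0 (gmap heights (cutsI D heights (m : Int))
                ++ [List.take (m - c') (List.drop c' heights)])
              ++ [(((cutsI D heights (m : Int)).length : Int), heights[m])] := by
          rw [kflat_append, kflat_singleton]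
          simp only [List.map_cons, List.map_nil]
          rw [show (0 : Int) + ((gmap heights (cutsI D heights (m : Int))
              ++ [List.take (m - c') (List.drop c' heights)]).length : Int)
            = ((cutsI D heights (m : Int)).length : Int) by rw [hXlen]; ring]
        have hg : ((cutsI D heights (m : Int)).length : Int) - 1 + 1
            = ((cutsI D heights (m : Int)).length : Int) := by omega
        rw [hgl, hcuts', hsl,
            gmap_snoc heights _ (cutsI_ne_nil D heights (m : Int)) (m : Int), ← hcdef, hcur]
        dsimp only
        rw [hg, hR, Prod.mk.injEq]
        refine ⟨rfl, ?_⟩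
        simp only [List.length_append, List.length_cons, List.length_nil]
        push_cast
        omega
      · -- no boundary: same group id
        rw [if_neg (fun hcontra => absurd hcontra.2 hb)]
        have hcuts' : cutsI D heights ((m + 1 : Nat) : Int) = cutsI D heights (m : Int) := by
          rw [hcuts, if_neg hb, List.append_nil]
        have hgl : (cutsI D heights ((m + 1 : Nat) : Int)).getLast
            (cutsI_ne_nil D heights ((m + 1 : Nat) : Int)) = c := by
          rw [List.getLast_eq_iff_getLast?_eq_some, hcuts', hcdef,
              List.getLast?_eq_some_getLast (cutsI_ne_nil D heights (m : Int))]
        have hsl : PySem.List.slice heights (some c) (some ((m + 1 : Nat) : Int))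
            = List.take (m - c') (List.drop c' heights) ++ [heights[m]] := by
          rw [PySem.List.slice_toNat heights hc0 (by positivity)]
          have harith : ((m + 1 : Nat) : Int).toNat - c.toNat = (m - c') + 1 := by omega
          rw [harith, List.take_succ, List.getElem?_drop]
          rw [List.getElem?_eq_getElem (by omega : c.toNat + (m - c.toNat) < heights.length)]
          simp only [show c.toNat + (m - c.toNat) = m by omega]
          rfl
        have hK : ((0 : Int) + ((gmap heights (cutsI D heights (m : Int))).length : Int))
            = ((cutsI D heights (m : Int)).length : Int) - 1 := by
          rw [hlgm]; omega
        rw [hgl, hcuts', hsl, hcur]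
        dsimp only
        rw [kflat_append, kflat_append, kflat_singleton, kflat_singleton, List.map_append, hK]
        simp only [List.map_cons, List.map_nil, List.append_assoc]

-- sorted2 with the two pair components is sorted with the lexicographic key.
lemma sorted2_eq_sorted_lex (xs : List (Int × Int)) :
    PySem.List.sorted2 xs (fun p => p.1) (fun p => p.2) false
      = PySem.List.sorted xs (fun p => toLex p) false := by
  have hfun : (fun a b : Int × Int =>
        decide (a.1 < b.1) || (!decide (b.1 < a.1) && decide (a.2 < b.2)))
      = (fun a b : Int × Int => decide (toLex a < toLex b)) := by
    funext a b
    rcases a with ⟨a1, a2⟩; rcases b with ⟨b1, b2⟩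
    simp only [Prod.Lex.lt_iff, ofLex_toLex]
    by_cases h1 : a1 < b1 <;> by_cases h2 : b1 < a1 <;> by_cases h3 : a2 < b2 <;>
      simp [h1, h2, h3] <;> omega
  show xs.foldl (fun acc x => PySem.List.insertBy _ x acc) []
      = xs.foldl (fun acc x => PySem.List.insertBy _ x acc) []
  rw [hfun]

-- the tagged flattening of weakly sorted blocks is lexicographically sorted
lemma kflat_pairwise (k : Int) (bs : List (List Int))
    (hb : ∀ g ∈ bs, g.Pairwise (· ≤ ·)) :
    (kflat k bs).Pairwise (fun a b : Int × Int => toLex a ≤ toLex b) := by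
  induction bs generalizing k with
  | nil => simp [kflat]
  | cons b bs ih =>
    simp only [kflat]
    rw [List.pairwise_append]
    refine ⟨?_, ih (k + 1) (fun g hg => hb g (List.mem_cons_of_mem b hg)), ?_⟩
    · refine List.Pairwise.map _ ?_ (hb b (List.mem_cons_self))
      intro a a' ha
      rw [Prod.Lex.le_iff]
      exact Or.inr ⟨rfl, ha⟩
    · intro p hp q hq
      simp only [List.mem_map] at hp
      obtain ⟨h, _, rfl⟩ := hp
      have := mem_kflat_fst (k + 1) bs q hq
      rw [Prod.Lex.le_iff]
      exact Or.inl (by simpa using by omega)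

lemma kflat_perm (k : Int) (bs : List (List Int)) :
    (kflat k (bs.map (fun g => PySem.List.sorted g (fun x => x) false))).Perm (kflat k bs) := by
  induction bs generalizing k with
  | nil => simp [kflat]
  | cons b bs ih =>
    simp only [List.map_cons, kflat]
    exact List.Perm.append
      ((PySem.List.sorted_perm b (fun x => x) false).map _) (ih (k + 1))

-- the key fact: one global lexicographic sort of the tagged list sorts each block in place
lemma sorted_kflat (k : Int) (bs : List (List Int)) :
    PySem.List.sorted (kflat k bs) (fun p => toLex p) false
      = kflat k (bs.map (fun g => PySem.List.sorted g (fun x => x) false)) := by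
  apply PySem.List.eq_of_perm_of_pairwise_le_of_injective (fun p : Int × Int => toLex p)
  · exact fun a b h => by simpa using h
  · exact ((PySem.List.sorted_perm _ _ _).trans (kflat_perm k bs).symm)
  · exact PySem.List.sorted_pairwise _ _
  · exact kflat_pairwise k _ (by
      intro g hg
      simp only [List.mem_map] at hg
      obtain ⟨g0, _, rfl⟩ := hg
      exact PySem.List.sorted_pairwise g0 (fun x => x))

lemma map_snd_kflat (k : Int) (bs : List (List Int)) :
    (kflat k bs).map (fun p : Int × Int => p.2) = bs.flatten := by
  induction bs generalizing k with
  | nil => simp [kflat]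
  | cons b bs ih =>
    simp [kflat, ih (k + 1), List.map_map]

-- ===== VERDICT (by name: the statement is the Claim_ definition above) =====
theorem min_lexicographical_order_spec : Claim_equal_min_lexicographical_order := by
  intro N D heights _hdom hpre
  unfold Spec_min_lexicographical_order
  have hA : min_lexicographical_order N D heights
      = (let st := (PySem.List.pyRange 0 N 1).foldl
            (fun st i => stepA D st (PySem.List.pyGetD heights i 0)) ([], [])
         let groups := if st.2 ≠ [] then st.1 ++ [st.2] else st.1
         (groups.map (fun g => PySem.List.sorted g (fun x => x) false)).foldl
            (fun acc g => acc ++ g) []) := rfl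
  have hB : min_lexicographical_order_alt N D heights
      = (let st := (PySem.List.pyRange 0 N 1).foldl (stepB D heights) ([], 0)
         (PySem.List.sorted2 st.1 (fun p => p.1) (fun p => p.2) false).map (fun p => p.2)) := rfl
  rw [hA, hB]
  by_cases hN0 : N ≤ 0
  · -- N ≤ 0 : both loops are empty, both sides are []
    have hr : PySem.List.pyRange 0 N 1 = [] := PySem.List.pyRange_one_eq_nil hN0
    simp only [hr, List.foldl_nil]
    simp [PySem.List.sorted2]
  · -- N ≥ 1
    have hN0' : 0 ≤ N := by omega
    have hNn : N = ((N.toNat : Nat) : Int) := (Int.toNat_of_nonneg hN0').symm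
    set n := N.toNat with hndef
    have h1 : 1 ≤ n := by omega
    have hnlen : n ≤ heights.length := by
      have := hpre
      unfold Pre_min_lexicographical_order at this
      omega
    rw [hNn, A_fold_take D heights n hnlen, loopA_inv D heights n h1 hnlen,
        loopB_inv D heights n h1 hnlen]
    set c : Int := (cutsI D heights (n : Int)).getLast (cutsI_ne_nil D heights (n : Int)) with hcdef
    have hcmem := cutsI_mem D heights (n : Int) c (List.getLast_mem _)
    have hc0 : 0 ≤ c := hcmem.1
    have hclt : c < (n : Int) := by
      rcases hcmem.2 with h | h
      · rw [h]; exact_mod_cast h1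
      · exact h
    have hcur : PySem.List.slice heights (some c) (some (n : Int))
        = (heights.drop c.toNat).take (n - c.toNat) := by
      rw [PySem.List.slice_toNat heights hc0 (by positivity)]
      simp
    have hlcur : ((heights.drop c.toNat).take (n - c.toNat)).length = n - c.toNat := by
      simp [List.length_take, List.length_drop]; omega
    have hne : PySem.List.slice heights (some c) (some (n : Int)) ≠ [] := by
      rw [hcur]
      intro hh
      rw [hh] at hlcur
      simp at hlcur
      omega
    show (List.foldl (fun acc g => acc ++ g) []
        (List.map (fun g => PySem.List.sorted g (fun x => x) false)
          (if PySem.List.slice heights (some c) (some (n : Int)) ≠ [] then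
            gmap heights (cutsI D heights (n : Int)) ++ [PySem.List.slice heights (some c) (some (n : Int))]
          else gmap heights (cutsI D heights (n : Int))))) = _
  -- both sides reduce to the flattening of the per-block sorts
    rw [if_pos hne]
    rw [PySem.List.foldl_append_eq_flatten, List.nil_append]
    dsimp only
    rw [sorted2_eq_sorted_lex, sorted_kflat, map_snd_kflat]
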